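-- pv_equiv track=rewrite | github.com/Mariya-Ilieva/MachineLearning | homework-5/task4.py | same_numbers
-- ===== SOURCE A (Python) =====
-- def same_numbers(arr1, arr2):
--     i = 0
--     j = 0
--
--     while i < len(arr1) and j < len(arr2):
--         if arr1[i] != arr2[j]:
--             return False
--
--         while i < len(arr1) - 1 and arr1[i] == arr1[i + 1]:
--             i += 1
--         while j < len(arr2) - 1 and arr2[j] == arr2[j + 1]:
--             j += 1
--
--         i += 1
--         j += 1
--
--     return i == len(arr1) and j == len(arr2)
-- ===== SOURCE B (Python) =====
-- def same_numbers(arr1, arr2):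
--     def compress(a):
--         c = []
--         for x in a:
--             if not c or c[-1] != x:
--                 c.append(x)
--         return c
--
--     c1 = compress(arr1)
--     c2 = compress(arr2)
--     if len(c1) != len(c2):
--         return False
--     for x, y in zip(c1, c2):
--         if x != y:
--             return False
--     return True
-- ===== Notes on version B (the rewrite author's own statement) =====
-- stated objective: simpler
-- what changed: Replaced A's interleaved two-index merge (with nested run-skipping while loops) by two independent run-compression passes followed by a plain element-wise comparison of the compressed lists.
import Mathlib
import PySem

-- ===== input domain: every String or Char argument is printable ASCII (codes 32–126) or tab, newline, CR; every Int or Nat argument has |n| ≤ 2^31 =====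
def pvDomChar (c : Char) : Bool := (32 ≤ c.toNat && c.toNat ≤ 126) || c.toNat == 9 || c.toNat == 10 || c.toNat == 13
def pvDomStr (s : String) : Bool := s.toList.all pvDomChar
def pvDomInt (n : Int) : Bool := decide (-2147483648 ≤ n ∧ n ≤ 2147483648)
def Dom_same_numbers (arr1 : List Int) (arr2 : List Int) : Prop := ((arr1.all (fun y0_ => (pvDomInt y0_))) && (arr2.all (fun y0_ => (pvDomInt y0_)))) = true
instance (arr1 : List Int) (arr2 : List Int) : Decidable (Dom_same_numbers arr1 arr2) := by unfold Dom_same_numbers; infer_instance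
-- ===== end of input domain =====

-- B replaces A's interleaved two-index merge by two independent run-compression
-- passes plus one element-wise comparison; same cost, simpler structure.

-- ===== PORT A =====
-- inner 'while i < len(arr)-1 and arr[i] == arr[i+1]: i += 1' (getD is only read at in-range indices)
def pvSkipRun (a : List Int) (i : Nat) : Nat :=
  if i < a.length - 1 ∧ a.getD i 0 = a.getD (i + 1) 0 then pvSkipRun a (i + 1) else i
termination_by a.length - 1 - i
decreasing_by omega

theorem pvSkipRun_ge (a : List Int) (i : Nat) : i ≤ pvSkipRun a i := by
  unfold pvSkipRun
  split
  · have := pvSkipRun_ge a (i + 1); omega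
  · exact le_refl _
termination_by a.length - 1 - i
decreasing_by rename_i h; omega

-- outer 'while i < len(arr1) and j < len(arr2): …'
def pvLoopA (a b : List Int) (i j : Nat) : Bool :=
  if h : i < a.length ∧ j < b.length then
    if a.getD i 0 ≠ b.getD j 0 then false
    else pvLoopA a b (pvSkipRun a i + 1) (pvSkipRun b j + 1)
  else decide (i = a.length ∧ j = b.length)
termination_by a.length - i
decreasing_by have := pvSkipRun_ge a i; omega

def same_numbers (arr1 : List Int) (arr2 : List Int) : Bool :=
  pvLoopA arr1 arr2 0 0

-- ===== PORT B =====
-- 'for x in a: if not c or c[-1] != x: c.append(x)'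
def pvCompress (a : List Int) : List Int :=
  a.foldl (fun c x => if c = [] ∨ c.getLast? ≠ some x then c ++ [x] else c) []

def same_numbers_alt (arr1 : List Int) (arr2 : List Int) : Bool :=
  let c1 := pvCompress arr1
  let c2 := pvCompress arr2
  if c1.length ≠ c2.length then false
  else (c1.zip c2).all (fun p => p.1 == p.2)

-- ===== PRECONDITION & SPEC =====
def Spec_same_numbers (arr1 : List Int) (arr2 : List Int) (out : Bool) : Prop := out = same_numbers_alt arr1 arr2
instance (arr1 : List Int) (arr2 : List Int) (out : Bool) : Decidable (Spec_same_numbers arr1 arr2 out) := by unfold Spec_same_numbers; infer_instance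

-- ===== CLAIM (what is proved, stated in full; the proofs are below) =====
def Claim_equal_same_numbers : Prop := ∀ (arr1 : List Int) (arr2 : List Int), Dom_same_numbers arr1 arr2 → Spec_same_numbers arr1 arr2 (same_numbers arr1 arr2)

-- ===== LEMMAS AND PROOFS =====

-- canonical adjacent-deduplication, the common semantics of both programs
def pvDedup : List Int → List Int
  | [] => []
  | [a] => [a]
  | a :: b :: t => if a = b then pvDedup (b :: t) else a :: pvDedup (b :: t)

-- tail dedup relative to a previous element
def pvCp (last : Int) : List Int → List Int
  | [] => []
  | x :: t => if last = x then pvCp last t else x :: pvCp x t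

theorem pvDedup_cons (x : Int) (t : List Int) : pvDedup (x :: t) = x :: pvCp x t := by
  induction t generalizing x with
  | nil => simp [pvDedup, pvCp]
  | cons y t ih =>
    by_cases h : x = y
    · subst h; simp [pvDedup, pvCp, ih]
    · simp [pvDedup, pvCp, h, ih]

theorem pvFoldl_compress (a : List Int) (c : List Int) (l : Int) (hc : c.getLast? = some l) :
    a.foldl (fun c x => if c = [] ∨ c.getLast? ≠ some x then c ++ [x] else c) c = c ++ pvCp l a := by
  induction a generalizing c l with
  | nil => simp [pvCp]
  | cons x t ih =>
    simp only [List.foldl_cons]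
    have hne : c ≠ [] := by intro h; simp [h] at hc
    by_cases h : l = x
    · subst h
      rw [if_neg (by simp [hc, hne])]
      simp [pvCp, ih c l hc]
    · rw [if_pos (Or.inr (by simp [hc, h]))]
      rw [ih (c ++ [x]) x (by simp)]
      simp [pvCp, h]

theorem pvCompress_eq_dedup (a : List Int) : pvCompress a = pvDedup a := by
  cases a with
  | nil => rfl
  | cons x t =>
    unfold pvCompress
    rw [List.foldl_cons]
    have e0 : (if ([] : List Int) = [] ∨ ([] : List Int).getLast? ≠ some x then ([] : List Int) ++ [x] else []) = [x] := by simp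
    rw [e0, pvFoldl_compress t [x] x (by simp), pvDedup_cons]
    rfl

-- drop i a viewed head-first
theorem pvDrop_eq (a : List Int) (i : Nat) (h : i < a.length) :
    a.drop i = a.getD i 0 :: a.drop (i + 1) := by
  rw [List.drop_eq_getElem_cons h]
  simp [List.getD, List.getElem?_eq_getElem h]

theorem pvSkip_dedup (a : List Int) (i : Nat) (h : i < a.length) :
    pvDedup (a.drop i) = a.getD i 0 :: pvDedup (a.drop (pvSkipRun a i + 1)) := by
  unfold pvSkipRun
  split
  · rename_i hc
    obtain ⟨h1, h2⟩ := hc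
    have hi1 : i + 1 < a.length := by omega
    have ih := pvSkip_dedup a (i + 1) hi1
    rw [pvDrop_eq a i h, pvDrop_eq a (i + 1) hi1]
    have e : pvDedup (a.getD i 0 :: a.getD (i + 1) 0 :: a.drop (i + 1 + 1))
        = pvDedup (a.getD (i + 1) 0 :: a.drop (i + 1 + 1)) := by
      simp only [pvDedup]; rw [if_pos h2]
    rw [e, ← pvDrop_eq a (i + 1) hi1, ih, h2]
  · rename_i hc
    by_cases h1 : i + 1 < a.length
    · have h2 : a.getD i 0 ≠ a.getD (i + 1) 0 := fun he => hc ⟨by omega, he⟩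
      rw [pvDrop_eq a i h, pvDrop_eq a (i + 1) h1]
      have e : pvDedup (a.getD i 0 :: a.getD (i + 1) 0 :: a.drop (i + 1 + 1))
          = a.getD i 0 :: pvDedup (a.getD (i + 1) 0 :: a.drop (i + 1 + 1)) := by
        simp only [pvDedup]; rw [if_neg h2]
      rw [e, ← pvDrop_eq a (i + 1) h1]
    · have hnil : a.drop (i + 1) = [] := List.drop_eq_nil_of_le (by omega)
      rw [pvDrop_eq a i h, hnil]
      simp [pvDedup]
termination_by a.length - 1 - i
decreasing_by rename_i hc; omega

theorem pvSkipRun_lt (a : List Int) (i : Nat) (h : i < a.length) : pvSkipRun a i < a.length := by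
  unfold pvSkipRun
  split
  · rename_i _hc; exact pvSkipRun_lt a (i + 1) (by omega)
  · exact h
termination_by a.length - 1 - i
decreasing_by rename_i hc; omega

theorem pvLoopA_eq (a b : List Int) (i j : Nat) (hi : i ≤ a.length) (hj : j ≤ b.length) :
    pvLoopA a b i j = decide (pvDedup (a.drop i) = pvDedup (b.drop j)) := by
  unfold pvLoopA
  split
  · rename_i hc
    obtain ⟨h1, h2⟩ := hc
    by_cases he : a.getD i 0 = b.getD j 0
    · rw [if_neg (not_not_intro he)]
      have hsa := pvSkipRun_lt a i h1
      have hsb := pvSkipRun_lt b j h2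
      rw [pvLoopA_eq a b (pvSkipRun a i + 1) (pvSkipRun b j + 1) (by omega) (by omega)]
      rw [pvSkip_dedup a i h1, pvSkip_dedup b j h2, he]
      simp
    · rw [if_pos he]
      rw [pvSkip_dedup a i h1, pvSkip_dedup b j h2]
      simp only [List.getD] at he
      simp [he]
  · rename_i hc
    by_cases hia : i = a.length
    · by_cases hjb : j = b.length
      · simp [hia, hjb, List.drop_length]
      · have hjlt : j < b.length := by omega
        rw [pvSkip_dedup b j hjlt]
        simp [hia, hjb, List.drop_length, pvDedup]
    · have hjb : j = b.length := by omega
      have hilt : i < a.length := by omega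
      rw [pvSkip_dedup a i hilt]
      simp [hia, hjb, List.drop_length, pvDedup]
termination_by a.length - i
decreasing_by have := pvSkipRun_ge a i; omega

theorem pvCmp_eq (c1 c2 : List Int) :
    (if c1.length ≠ c2.length then false else (c1.zip c2).all (fun p => p.1 == p.2)) = decide (c1 = c2) := by
  induction c1 generalizing c2 with
  | nil => cases c2 <;> simp
  | cons x t ih =>
    cases c2 with
    | nil => simp
    | cons y s =>
      have := ih s
      by_cases hl : t.length = s.length
      · by_cases hxy : x = y <;> simp_all
      · simp_all

-- ===== VERDICT (by name: the statement is the Claim_ definition above) =====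
theorem same_numbers_spec : Claim_equal_same_numbers := by
  intro arr1 arr2 _
  unfold Spec_same_numbers same_numbers same_numbers_alt
  rw [pvLoopA_eq arr1 arr2 0 0 (by omega) (by omega)]
  simp only [List.drop_zero, pvCompress_eq_dedup]
  exact (pvCmp_eq (pvDedup arr1) (pvDedup arr2)).symm
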